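-- pv_equiv track=rewrite | github.com/eventhorizn/projects | adventOfCode/2015/day_3/main.py | move_person
-- ===== SOURCE A (Python) =====
-- def move_person(moves: list[str], person: str):
--     loc_x = 1
--     loc_y = 1
--     key = (loc_x, loc_x)
--     visited = {key: 1}
--     start_number = 1
--
--     for move in moves:
--         # only events for santa
--         if person == "santa" and start_number % 2 == 0:
--             start_number += 1
--             continue
--         # only odds for robo
--         if person == "robo" and start_number % 2 != 0:
--             start_number += 1
--             continue
--
--         # north
--         if move == '^':
--             loc_y += 1
--         # south
--         if move == 'v':
--             loc_y -= 1
--         # east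
--         if move == '>':
--             loc_x += 1
--         # west
--         if move == '<':
--             loc_x -= 1
--
--         key = (loc_x, loc_y)
--         if key in visited:
--             visited[key] += 1
--         else:
--             visited[key] = 1
--
--         start_number += 1
--
--     return visited
-- ===== SOURCE B (Python) =====
-- def move_person(moves: list[str], person: str):
--     # which indices this person executes: santa -> even, robo -> odd, anyone else -> all
--     if person == "santa":
--         sel = [moves[i] for i in range(0, len(moves), 2)]
--     elif person == "robo":
--         sel = [moves[i] for i in range(1, len(moves), 2)]
--     else:
--         sel = list(moves)
--     dx = {'>': 1, '<': -1}
--     dy = {'^': 1, 'v': -1}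
--     # closed form: the i-th visited coordinate is 1 plus the displacement sum of the first i moves
--     path = [(1 + sum(dx.get(m, 0) for m in sel[:i]),
--              1 + sum(dy.get(m, 0) for m in sel[:i]))
--             for i in range(len(sel) + 1)]
--     # count each distinct coordinate, in first-visit order
--     return {p: path.count(p) for p in dict.fromkeys(path)}
-- ===== Notes on version B (the rewrite author's own statement) =====
-- stated objective: alternative
-- what changed: A's single stateful walk (a skip-by-parity counter, in-place position updates and a per-step dict bump) is replaced by a stateless closed-form pipeline: the executed moves are picked by index parity with range(start, len, 2), the i-th visited coordinate is computed directly as 1 plus the displacement sum of the first i selected moves, and the result dict maps each distinct coordinate (first-visit order) to its count in that path.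
import Mathlib
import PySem

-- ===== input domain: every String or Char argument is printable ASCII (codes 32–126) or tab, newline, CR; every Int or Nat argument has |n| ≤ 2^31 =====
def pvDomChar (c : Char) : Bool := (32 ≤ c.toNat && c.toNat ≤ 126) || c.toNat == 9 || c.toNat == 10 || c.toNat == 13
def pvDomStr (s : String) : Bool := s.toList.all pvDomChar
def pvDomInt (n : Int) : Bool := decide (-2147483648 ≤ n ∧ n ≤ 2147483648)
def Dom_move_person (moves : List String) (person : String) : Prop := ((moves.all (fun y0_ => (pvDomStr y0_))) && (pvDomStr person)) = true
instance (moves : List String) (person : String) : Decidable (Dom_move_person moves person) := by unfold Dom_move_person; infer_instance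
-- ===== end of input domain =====

-- B replaces A's stateful skip-and-step walk by a stateless pipeline: index-parity selection, closed-form prefix-sum coordinates, then a count per distinct coordinate (alternative decomposition; B is quadratic where A is linear).


-- ===== PORT A =====
def pvStepA (person : String) (st : Int × Int × PySem.Dict (Int × Int) Int × Int) (move : String) :
    Int × Int × PySem.Dict (Int × Int) Int × Int :=
  match st with
  | (loc_x, loc_y, visited, start_number) =>
    if person == "santa" && PySem.Int.mod start_number 2 == 0 then
      (loc_x, loc_y, visited, start_number + 1)
    else if person == "robo" && !(PySem.Int.mod start_number 2 == 0) then
      (loc_x, loc_y, visited, start_number + 1)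
    else
      let loc_y := if move == "^" then loc_y + 1 else loc_y
      let loc_y := if move == "v" then loc_y - 1 else loc_y
      let loc_x := if move == ">" then loc_x + 1 else loc_x
      let loc_x := if move == "<" then loc_x - 1 else loc_x
      let key := (loc_x, loc_y)
      let visited := if visited.contains key then visited.insert key (visited.getD key 0 + 1)
                     else visited.insert key 1
      (loc_x, loc_y, visited, start_number + 1)

def move_person (moves : List String) (person : String) : List (Int × Int × Int) :=
  let st := moves.foldl (pvStepA person) (1, 1, PySem.Dict.empty.insert (1, 1) 1, 1)
  st.2.2.1.items.map (fun kv => (kv.1.1, kv.1.2, kv.2))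

-- ===== PORT B =====
def pvDx : PySem.Dict String Int := PySem.Dict.ofList [(">", 1), ("<", -1)]
def pvDy : PySem.Dict String Int := PySem.Dict.ofList [("^", 1), ("v", -1)]

def move_person_alt (moves : List String) (person : String) : List (Int × Int × Int) :=
  let sel :=
    if person == "santa" then
      (PySem.List.pyRange 0 (PySem.List.len moves) 2).map (fun i => PySem.List.pyGetD moves i "")
    else if person == "robo" then
      (PySem.List.pyRange 1 (PySem.List.len moves) 2).map (fun i => PySem.List.pyGetD moves i "")
    else moves
  -- moves[i] with i drawn from range(start, len(moves), 2) is always in range: pyGetD is exact here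
  let path := (PySem.List.pyRange 0 (PySem.List.len sel + 1) 1).map (fun i =>
      (1 + ((PySem.List.slice sel none (some i)).map (fun m => pvDx.getD m 0)).sum,
       1 + ((PySem.List.slice sel none (some i)).map (fun m => pvDy.getD m 0)).sum))
  let counts := (PySem.List.dedup path).foldl
      (fun (d : PySem.Dict (Int × Int) Int) p => d.insert p ((path.count p : Int))) PySem.Dict.empty
  counts.items.map (fun kv => (kv.1.1, kv.1.2, kv.2))

-- ===== PRECONDITION & SPEC =====
def Spec_move_person (moves : List String) (person : String) (out : List (Int × Int × Int)) : Prop := out = move_person_alt moves person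
instance (moves : List String) (person : String) (out : List (Int × Int × Int)) : Decidable (Spec_move_person moves person out) := by unfold Spec_move_person; infer_instance

-- ===== CLAIM (what is proved, stated in full; the proofs are below) =====
def Claim_equal_move_person : Prop := ∀ (moves : List String) (person : String), Dom_move_person moves person → Spec_move_person moves person (move_person moves person)

-- ===== LEMMAS AND PROOFS =====

-- x- and y-displacement of one move character (B's table lookups)
def pvDxF (m : String) : Int := pvDx.getD m 0
def pvDyF (m : String) : Int := pvDy.getD m 0

-- the moves A's parity logic actually processes, starting at counter sn
def pvSelP (person : String) (sn : Int) : List String → List String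
  | [] => []
  | m :: ms =>
    if person == "santa" && PySem.Int.mod sn 2 == 0 then pvSelP person (sn + 1) ms
    else if person == "robo" && !(PySem.Int.mod sn 2 == 0) then pvSelP person (sn + 1) ms
    else m :: pvSelP person (sn + 1) ms

-- elements at even / odd indices
def pvEvens {α : Type} : List α → List α
  | [] => []
  | [x] => [x]
  | x :: _ :: xs => x :: pvEvens xs

def pvOdds {α : Type} (xs : List α) : List α := pvEvens xs.tail

-- the coordinates visited starting from (x, y)
def pvVisits (x y : Int) : List String → List (Int × Int)
  | [] => []
  | m :: ms => (x + pvDxF m, y + pvDyF m) :: pvVisits (x + pvDxF m) (y + pvDyF m) ms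

-- the final position
def pvEndP (x y : Int) : List String → Int × Int
  | [] => (x, y)
  | m :: ms => pvEndP (x + pvDxF m) (y + pvDyF m) ms

def pvIns (d : PySem.Dict (Int × Int) Int) (p : Int × Int) : PySem.Dict (Int × Int) Int :=
  d.insert p (d.getD p 0 + 1)

lemma pvDx_mk : pvDx = PySem.Dict.mk [(">", 1), ("<", -1)] := by rfl
lemma pvDy_mk : pvDy = PySem.Dict.mk [("^", 1), ("v", -1)] := by rfl

lemma pvDxF_other (m : String) (h3 : m ≠ ">") (h4 : m ≠ "<") : pvDxF m = 0 := by
  simp [pvDxF, PySem.Dict.getD_eq_get?_getD, pvDx_mk, PySem.Dict.get?, Ne.symm h3, Ne.symm h4]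

lemma pvDyF_other (m : String) (h1 : m ≠ "^") (h2 : m ≠ "v") : pvDyF m = 0 := by
  simp [pvDyF, PySem.Dict.getD_eq_get?_getD, pvDy_mk, PySem.Dict.get?, Ne.symm h1, Ne.symm h2]

lemma pvStepMove (move : String) (x y : Int) :
    ((if move == "<" then (if move == ">" then x + 1 else x) - 1
      else (if move == ">" then x + 1 else x)),
     (if move == "v" then (if move == "^" then y + 1 else y) - 1
      else (if move == "^" then y + 1 else y)))
    = (x + pvDxF move, y + pvDyF move) := by
  by_cases h1 : move = "^"
  · subst h1; simp [show pvDxF "^" = 0 from by decide, show pvDyF "^" = 1 from by decide]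
  · by_cases h2 : move = "v"
    · subst h2
      simp [show pvDxF "v" = 0 from by decide, show pvDyF "v" = -1 from by decide]; ring
    · by_cases h3 : move = ">"
      · subst h3
        simp [show pvDxF ">" = 1 from by decide, show pvDyF ">" = 0 from by decide]
      · by_cases h4 : move = "<"
        · subst h4
          simp [show pvDxF "<" = -1 from by decide, show pvDyF "<" = 0 from by decide]; ring
        · simp [pvDxF_other move h3 h4, pvDyF_other move h1 h2, h1, h2, h3, h4]

lemma pvInsEq (d : PySem.Dict (Int × Int) Int) (k : Int × Int) :
    (if d.contains k then d.insert k (d.getD k 0 + 1) else d.insert k 1) = pvIns d k := by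
  unfold pvIns
  by_cases h : d.contains k = true
  · simp [h]
  · have h0 : d.getD k 0 = 0 := by
      rw [PySem.Dict.getD_of_not_contains]; simpa using h
    simp [h, h0]

-- A's loop, characterised: it processes exactly pvSelP's moves, visiting pvVisits' coordinates
lemma pvFoldA (person : String) : ∀ (moves : List String) (x y : Int)
    (d : PySem.Dict (Int × Int) Int) (sn : Int),
    moves.foldl (pvStepA person) (x, y, d, sn) =
      ((pvEndP x y (pvSelP person sn moves)).1, (pvEndP x y (pvSelP person sn moves)).2,
       (pvVisits x y (pvSelP person sn moves)).foldl pvIns d, sn + moves.length) := by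
  intro moves
  induction moves with
  | nil => intro x y d sn; simp [pvSelP, pvEndP, pvVisits]
  | cons m ms ih =>
    intro x y d sn
    simp only [List.foldl_cons]
    by_cases h1 : (person == "santa" && PySem.Int.mod sn 2 == 0) = true
    · rw [show pvStepA person (x, y, d, sn) m = (x, y, d, sn + 1) by
        simp only [pvStepA]; rw [if_pos h1]]
      rw [ih, show pvSelP person sn (m :: ms) = pvSelP person (sn + 1) ms from by
        simp only [pvSelP]; rw [if_pos h1]]
      rw [show sn + 1 + (ms.length : Int) = sn + ((m :: ms).length : Int) by push_cast [List.length_cons]; omega]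
    · by_cases h2 : (person == "robo" && !(PySem.Int.mod sn 2 == 0)) = true
      · rw [show pvStepA person (x, y, d, sn) m = (x, y, d, sn + 1) by
          simp only [pvStepA]; rw [if_neg h1, if_pos h2]]
        rw [ih, show pvSelP person sn (m :: ms) = pvSelP person (sn + 1) ms from by
          simp only [pvSelP]; rw [if_neg h1, if_pos h2]]
        rw [show sn + 1 + (ms.length : Int) = sn + ((m :: ms).length : Int) by push_cast [List.length_cons]; omega]
      · have hs : pvStepA person (x, y, d, sn) m =
            (x + pvDxF m, y + pvDyF m,
             pvIns d (x + pvDxF m, y + pvDyF m), sn + 1) := by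
          simp only [pvStepA, if_neg h1, if_neg h2]
          rw [pvInsEq]
          have := pvStepMove m x y
          simp only [Prod.mk.injEq] at this
          simp only [this.1, this.2]
        rw [hs, ih, show pvSelP person sn (m :: ms) = m :: pvSelP person (sn + 1) ms from by
          simp only [pvSelP]; rw [if_neg h1, if_neg h2]]
        rw [show sn + 1 + (ms.length : Int) = sn + ((m :: ms).length : Int) by push_cast [List.length_cons]; omega]
        simp only [pvEndP, pvVisits, List.foldl_cons]

lemma pvEvens_cons {α : Type} (m : α) (ms : List α) : pvEvens (m :: ms) = m :: pvOdds ms := by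
  cases ms <;> rfl

-- A's parity selection is selection by index parity
lemma pvSelP_parity : ∀ (ms : List String) (sn : Int),
    (PySem.Int.mod sn 2 = 1 → pvSelP "santa" sn ms = pvEvens ms ∧ pvSelP "robo" sn ms = pvOdds ms)
  ∧ (PySem.Int.mod sn 2 = 0 → pvSelP "santa" sn ms = pvOdds ms ∧ pvSelP "robo" sn ms = pvEvens ms) := by
  intro ms
  induction ms with
  | nil => intro sn; constructor <;> intro _ <;> simp [pvSelP, pvEvens, pvOdds]
  | cons m ms ih =>
    intro sn
    have hmod := PySem.Int.mod_eq_emod_of_pos (a := sn) (b := 2) (by norm_num)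
    have hmod1 := PySem.Int.mod_eq_emod_of_pos (a := sn + 1) (b := 2) (by norm_num)
    constructor
    · intro h1
      rw [hmod] at h1
      have h0 : PySem.Int.mod (sn + 1) 2 = 0 := by rw [hmod1]; omega
      have hb : (PySem.Int.mod sn 2 == 0) = false := by rw [hmod, h1]; rfl
      have hcs : ("santa" == "santa" && PySem.Int.mod sn 2 == 0) = false := by rw [hb]; rfl
      have hcr : ("robo" == "robo" && !(PySem.Int.mod sn 2 == 0)) = true := by rw [hb]; rfl
      constructor
      · rw [show pvSelP "santa" sn (m :: ms) = m :: pvSelP "santa" (sn + 1) ms from by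
          simp only [pvSelP]; rw [if_neg (by rw [hcs]; simp), if_neg (by simp)]]
        rw [((ih (sn + 1)).2 h0).1, pvEvens_cons]
      · rw [show pvSelP "robo" sn (m :: ms) = pvSelP "robo" (sn + 1) ms from by
          simp only [pvSelP]; rw [if_neg (by simp), if_pos hcr]]
        rw [((ih (sn + 1)).2 h0).2, pvOdds]; rfl
    · intro h0
      rw [hmod] at h0
      have h1 : PySem.Int.mod (sn + 1) 2 = 1 := by rw [hmod1]; omega
      have hb : (PySem.Int.mod sn 2 == 0) = true := by rw [hmod, h0]; rfl
      have hcs : ("santa" == "santa" && PySem.Int.mod sn 2 == 0) = true := by rw [hb]; rfl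
      have hcr : ("robo" == "robo" && !(PySem.Int.mod sn 2 == 0)) = false := by rw [hb]; rfl
      constructor
      · rw [show pvSelP "santa" sn (m :: ms) = pvSelP "santa" (sn + 1) ms from by
          simp only [pvSelP]; rw [if_pos hcs]]
        rw [((ih (sn + 1)).1 h1).1, pvOdds]; rfl
      · rw [show pvSelP "robo" sn (m :: ms) = m :: pvSelP "robo" (sn + 1) ms from by
          simp only [pvSelP]; rw [if_neg (by simp), if_neg (by rw [hcr]; simp)]]
        rw [((ih (sn + 1)).1 h1).2, pvEvens_cons]

lemma pvSelOther (person : String) (hs : person ≠ "santa") (hr : person ≠ "robo") :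
    ∀ (moves : List String) (sn : Int), pvSelP person sn moves = moves := by
  intro moves
  induction moves with
  | nil => intro sn; simp [pvSelP]
  | cons m ms ih => intro sn; simp [pvSelP, hs, hr, ih]

-- B's indexed selections compute pvEvens / pvOdds
lemma pvEvensIdx (d : String) : ∀ (xs : List String),
    (List.range ((xs.length + 1) / 2)).map (fun k => xs.getD (2 * k) d) = pvEvens xs := by
  intro xs
  induction xs using pvEvens.induct with
  | case1 => rfl
  | case2 x =>
    rw [show ([x].length + 1) / 2 = 1 from by simp, List.range_one]
    simp [pvEvens]
  | case3 x y xs ih =>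
    have hlen : ((x :: y :: xs).length + 1) / 2 = (xs.length + 1) / 2 + 1 := by
      simp [List.length_cons]; omega
    rw [hlen, List.range_succ_eq_map, List.map_cons, List.map_map]
    have hf : ((fun k => (x :: y :: xs).getD (2 * k) d) ∘ Nat.succ)
        = (fun k => xs.getD (2 * k) d) := by
      funext k
      have h2 : 2 * Nat.succ k = 2 * k + 1 + 1 := by omega
      simp [Function.comp, h2]
    rw [hf, ih]
    rfl

lemma pvOddsIdx (d : String) (xs : List String) :
    (List.range (xs.length / 2)).map (fun k => xs.getD (2 * k + 1) d) = pvOdds xs := by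
  cases xs with
  | nil => rfl
  | cons x ms =>
    have hlen : (x :: ms).length / 2 = (ms.length + 1) / 2 := by
      simp [List.length_cons]
    rw [hlen]
    have hf : (fun k => (x :: ms).getD (2 * k + 1) d) = (fun k => ms.getD (2 * k) d) := by
      funext k; simp
    rw [hf, pvEvensIdx d ms, pvOdds]; rfl

lemma pvSelBSanta (moves : List String) :
    (PySem.List.pyRange 0 (PySem.List.len moves) 2).map (fun i => PySem.List.pyGetD moves i "")
      = pvEvens moves := by
  rw [PySem.List.len_eq, PySem.List.pyRange_of_pos 0 (moves.length : Int) (by norm_num)]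
  have hcnt : (if (0 : Int) < (moves.length : Int)
      then (((moves.length : Int) - 0 + 2 - 1) / 2).toNat else 0) = (moves.length + 1) / 2 := by
    split_ifs <;> omega
  rw [hcnt, List.map_map]
  have hf : ((fun i => PySem.List.pyGetD moves i "") ∘ (fun k : Nat => 0 + 2 * (k : Int)))
      = (fun k => moves.getD (2 * k) "") := by
    funext k
    simp only [Function.comp_apply]
    rw [show (0 + 2 * (k : Int)) = ((2 * k : Nat) : Int) from by push_cast; ring,
      PySem.List.pyGetD_natCast]
  rw [hf, pvEvensIdx]

lemma pvSelBRobo (moves : List String) :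
    (PySem.List.pyRange 1 (PySem.List.len moves) 2).map (fun i => PySem.List.pyGetD moves i "")
      = pvOdds moves := by
  rw [PySem.List.len_eq, PySem.List.pyRange_of_pos 1 (moves.length : Int) (by norm_num)]
  have hcnt : (if (1 : Int) < (moves.length : Int)
      then (((moves.length : Int) - 1 + 2 - 1) / 2).toNat else 0) = moves.length / 2 := by
    split_ifs <;> omega
  rw [hcnt, List.map_map]
  have hf : ((fun i => PySem.List.pyGetD moves i "") ∘ (fun k : Nat => 1 + 2 * (k : Int)))
      = (fun k => moves.getD (2 * k + 1) "") := by
    funext k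
    simp only [Function.comp_apply]
    rw [show (1 + 2 * (k : Int)) = ((2 * k + 1 : Nat) : Int) from by push_cast; ring,
      PySem.List.pyGetD_natCast]
  rw [hf, pvOddsIdx]

-- B's closed-form coordinates are exactly the visited path, prepended with the start
lemma pvPathClosed : ∀ (sel : List String) (x y : Int),
    (List.range (sel.length + 1)).map (fun k =>
      (x + ((sel.take k).map pvDxF).sum, y + ((sel.take k).map pvDyF).sum))
    = (x, y) :: pvVisits x y sel := by
  intro sel
  induction sel with
  | nil => intro x y; simp [pvVisits]
  | cons m ms ih =>
    intro x y
    rw [show (m :: ms).length + 1 = (ms.length + 1) + 1 from by simp]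
    rw [List.range_succ_eq_map, List.map_cons, List.map_map]
    have hf : ((fun k => (x + (((m :: ms).take k).map pvDxF).sum,
          y + (((m :: ms).take k).map pvDyF).sum)) ∘ Nat.succ)
        = (fun k => ((x + pvDxF m) + ((ms.take k).map pvDxF).sum,
            (y + pvDyF m) + ((ms.take k).map pvDyF).sum)) := by
      funext k
      simp [Function.comp, List.take_succ_cons]
      constructor <;> ring
    rw [hf, ih]
    simp [pvVisits]

-- B's whole path expression, as a function of the selected moves
lemma pvPathB (sel : List String) :
    (PySem.List.pyRange 0 (PySem.List.len sel + 1) 1).map (fun i =>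
      (1 + ((PySem.List.slice sel none (some i)).map (fun m => pvDx.getD m 0)).sum,
       1 + ((PySem.List.slice sel none (some i)).map (fun m => pvDy.getD m 0)).sum))
    = (1, 1) :: pvVisits 1 1 sel := by
  rw [PySem.List.len_eq,
    show ((sel.length : Int) + 1) = ((sel.length + 1 : Nat) : Int) from by push_cast; ring,
    PySem.List.pyRange_zero_natCast, List.map_map]
  have hf : ((fun i => (1 + ((PySem.List.slice sel none (some i)).map (fun m => pvDx.getD m 0)).sum,
        1 + ((PySem.List.slice sel none (some i)).map (fun m => pvDy.getD m 0)).sum))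
        ∘ (fun k : Nat => (k : Int)))
      = (fun k => ((1 : Int) + ((sel.take k).map pvDxF).sum,
          (1 : Int) + ((sel.take k).map pvDyF).sum)) := by
    funext k
    simp only [Function.comp_apply, PySem.List.slice_to_natCast]
    rw [show (fun m => pvDx.getD m 0) = pvDxF from rfl, show (fun m => pvDy.getD m 0) = pvDyF from rfl]
  rw [hf, pvPathClosed]

-- the two counting loops build the same items list over any path
lemma pvCountEq (path : List (Int × Int)) :
    ((path.foldl pvIns PySem.Dict.empty).items : List ((Int × Int) × Int))
      = ((PySem.List.dedup path).foldl
          (fun (d : PySem.Dict (Int × Int) Int) p => d.insert p ((path.count p : Int)))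
          PySem.Dict.empty).items := by
  rw [show path.foldl pvIns PySem.Dict.empty
      = path.foldl (fun d x => d.insert x (d.getD x 0 + 1)) PySem.Dict.empty from rfl,
    PySem.Dict.foldl_insert_getD_add_one_eq_counter, PySem.Dict.items_counter]
  have h := PySem.Dict.items_foldl_insert_fresh (PySem.List.dedup path) (fun a => a)
      (fun p => (path.count p : Int)) PySem.Dict.empty
      (fun a _ => PySem.Dict.contains_empty a)
      (by simp)
  rw [h]
  simp [PySem.List.dedup_eq_ofList, show PySem.Dict.empty.items = ([] : List ((Int × Int) × Int)) from rfl]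

-- ===== VERDICT (by name: the statement is the Claim_ definition above) =====
theorem move_person_spec : Claim_equal_move_person := by
  intro moves person _
  unfold Spec_move_person
  simp only [move_person, move_person_alt]
  rw [pvFoldA person moves 1 1 (PySem.Dict.empty.insert (1, 1) 1) 1]
  have hinit : PySem.Dict.empty.insert ((1 : Int), (1 : Int)) (1 : Int) =
      pvIns PySem.Dict.empty (1, 1) := by
    simp [pvIns, PySem.Dict.getD_empty]
  -- A's dict is the pvIns-fold over the full path (start included)
  have hsel : (if person == "santa" then
        (PySem.List.pyRange 0 (PySem.List.len moves) 2).map (fun i => PySem.List.pyGetD moves i "")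
      else if person == "robo" then
        (PySem.List.pyRange 1 (PySem.List.len moves) 2).map (fun i => PySem.List.pyGetD moves i "")
      else moves) = pvSelP person 1 moves := by
    by_cases hs : person = "santa"
    · subst hs
      rw [if_pos (by simp), pvSelBSanta,
        ((pvSelP_parity moves 1).1 (by decide)).1]
    · by_cases hr : person = "robo"
      · subst hr
        rw [if_neg (by simp), if_pos (by simp), pvSelBRobo,
          ((pvSelP_parity moves 1).1 (by decide)).2]
      · rw [if_neg (by simpa using hs), if_neg (by simpa using hr),
          pvSelOther person hs hr moves 1]
  rw [hsel, hinit, pvPathB (pvSelP person 1 moves),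
    show (pvVisits 1 1 (pvSelP person 1 moves)).foldl pvIns (pvIns PySem.Dict.empty (1, 1))
      = ((1, 1) :: pvVisits 1 1 (pvSelP person 1 moves)).foldl pvIns PySem.Dict.empty from rfl,
    pvCountEq]
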